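-- pv_equiv track=rewrite | github.com/schollz/img2gcode | img2gcode.py | merge_similar
-- ===== SOURCE A (Python) =====
-- def dist2(p1, p2):
--     return (p1[0] - p2[0]) ** 2 + (p1[1] - p2[1]) ** 2
--
-- def merge_similar(paths, threshold_dist):
--     if len(paths) <= 1:
--         return paths
--     # merge similar paths
--     final_paths = []
--     for i, coords in enumerate(paths):
--         if i == 0:
--             final_paths.append(coords)
--             continue
--         d = dist2(
--             coords[0],
--             final_paths[len(final_paths) - 1][
--                 len(final_paths[len(final_paths) - 1]) - 1
--             ],
--         )
--         if d < threshold_dist: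
--             final_paths[len(final_paths) - 1] += coords
--         else:
--             final_paths.append(coords)
--
--     return final_paths
-- ===== SOURCE B (Python) =====
-- def dist2(p1, p2):
--     return (p1[0] - p2[0]) ** 2 + (p1[1] - p2[1]) ** 2
--
-- def merge_similar(paths, threshold_dist):
--     if len(paths) <= 1:
--         return paths
--     # Pass 1: segment the sequence into maximal runs of near-adjacent paths,
--     # comparing each path's first point with its predecessor's last point.
--     runs = [[paths[0]]]
--     for prev, cur in zip(paths, paths[1:]):
--         if dist2(cur[0], prev[-1]) < threshold_dist:
--             runs[-1].append(cur)
--         else: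
--             runs.append([cur])
--     # Pass 2: collapse each run onto its first path object (in place, like A).
--     out = []
--     for run in runs:
--         base = run[0]
--         for extra in run[1:]:
--             base += extra
--         out.append(base)
--     return out
-- ===== Notes on version B (the rewrite author's own statement) =====
-- stated objective: alternative
-- what changed: A merges in a single pass comparing each path against the evolving merged tail; B first segments the sequence into maximal runs by comparing only original adjacent paths, then collapses each run onto its first path in a second pass.
import Mathlib
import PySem

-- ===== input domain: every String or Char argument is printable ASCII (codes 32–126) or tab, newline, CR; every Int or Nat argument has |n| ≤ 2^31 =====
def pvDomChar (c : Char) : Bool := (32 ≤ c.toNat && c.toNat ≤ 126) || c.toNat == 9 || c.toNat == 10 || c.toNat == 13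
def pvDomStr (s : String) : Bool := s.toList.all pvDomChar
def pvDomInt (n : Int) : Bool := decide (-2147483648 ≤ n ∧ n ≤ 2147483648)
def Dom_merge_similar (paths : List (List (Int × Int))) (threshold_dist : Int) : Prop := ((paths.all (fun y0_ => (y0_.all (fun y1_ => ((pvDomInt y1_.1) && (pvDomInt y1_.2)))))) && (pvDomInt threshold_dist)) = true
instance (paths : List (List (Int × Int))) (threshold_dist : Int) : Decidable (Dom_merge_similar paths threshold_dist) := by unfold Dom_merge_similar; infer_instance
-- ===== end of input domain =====

-- B segments into maximal runs first (comparing original adjacent paths), then collapses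
-- each run in a second pass — a different decomposition; equivalence is about return values,
-- and B performs the same in-place mutation of the first path of each run as A.

-- ===== PORT A =====
def dist2 (p1 p2 : Int × Int) : Int := (p1.1 - p2.1) ^ 2 + (p1.2 - p2.2) ^ 2

-- one iteration of A's loop for i ≥ 1; Python's coords[0] and [...][-1] would raise on
-- empty lists (excluded by Pre_), so the defaults in headD/getLastD are never relevant there
def mergeAStep (t : Int) (fs : List (List (Int × Int))) (coords : List (Int × Int)) :
    List (List (Int × Int)) :=
  let last := fs.getLastD []
  let d := dist2 (coords.headD (0, 0)) (last.getLastD (0, 0))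
  if d < t then fs.dropLast ++ [last ++ coords] else fs ++ [coords]

def merge_similar (paths : List (List (Int × Int))) (threshold_dist : Int) :
    List (List (Int × Int)) :=
  if paths.length ≤ 1 then paths
  else
    match paths with
    | [] => []
    | p0 :: rest => rest.foldl (mergeAStep threshold_dist) [p0]

-- ===== PORT B =====
-- B pass 1: extend the last run or start a new one, comparing cur[0] with prev[-1]
def bStep (t : Int) (runs : List (List (List (Int × Int))))
    (pc : List (Int × Int) × List (Int × Int)) : List (List (List (Int × Int))) :=
  if dist2 (pc.2.headD (0, 0)) (pc.1.getLastD (0, 0)) < t then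
    runs.dropLast ++ [runs.getLastD [] ++ [pc.2]]
  else runs ++ [[pc.2]]

-- B pass 2: concatenate a run onto its first path
def collapse (run : List (List (Int × Int))) : List (Int × Int) :=
  match run with
  | [] => []
  | base :: extras => extras.foldl (· ++ ·) base

def merge_similar_alt (paths : List (List (Int × Int))) (threshold_dist : Int) :
    List (List (Int × Int)) :=
  if paths.length ≤ 1 then paths
  else
    match paths with
    | [] => []
    | p0 :: rest =>
      ((((p0 :: rest).zip rest).foldl (bStep threshold_dist) [[p0]]).map collapse)

-- ===== PRECONDITION & SPEC =====
-- Pre_ excludes only inputs on which Python A raises IndexError: two or more paths with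
-- some path empty (coords[0] / [...][-1] on an empty list).
def Pre_merge_similar (paths : List (List (Int × Int))) (threshold_dist : Int) : Prop :=
  paths.length ≤ 1 ∨ ∀ p ∈ paths, p ≠ []
instance (paths : List (List (Int × Int))) (threshold_dist : Int) :
    Decidable (Pre_merge_similar paths threshold_dist) := by
  unfold Pre_merge_similar; infer_instance
def pvWitness_merge_similar : (List (List (Int × Int))) × Int :=
  ([[(0, 0), (1, 1)], [(1, 2), (5, 5)], [(9, 9)]], 3)
def Spec_merge_similar (paths : List (List (Int × Int))) (threshold_dist : Int)
    (out : List (List (Int × Int))) : Prop := out = merge_similar_alt paths threshold_dist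
instance (paths : List (List (Int × Int))) (threshold_dist : Int)
    (out : List (List (Int × Int))) : Decidable (Spec_merge_similar paths threshold_dist out) := by
  unfold Spec_merge_similar; infer_instance

-- ===== CLAIM (what is proved, stated in full; the proofs are below) =====
def Claim_equal_merge_similar : Prop := ∀ (paths : List (List (Int × Int))) (threshold_dist : Int), Dom_merge_similar paths threshold_dist → Pre_merge_similar paths threshold_dist → Spec_merge_similar paths threshold_dist (merge_similar paths threshold_dist)

-- ===== LEMMAS AND PROOFS =====

-- recursive characterisation of A's loop: accumulator is the last merged path
def canonA (t : Int) (acc : List (Int × Int)) :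
    List (List (Int × Int)) → List (List (Int × Int))
  | [] => [acc]
  | c :: cs =>
    if dist2 (c.headD (0, 0)) (acc.getLastD (0, 0)) < t then canonA t (acc ++ c) cs
    else acc :: canonA t c cs

-- recursive characterisation of B's first pass: current run and previous path
def canonB (t : Int) (run : List (List (Int × Int))) (prev : List (Int × Int)) :
    List (List (Int × Int)) → List (List (List (Int × Int)))
  | [] => [run]
  | c :: cs =>
    if dist2 (c.headD (0, 0)) (prev.getLastD (0, 0)) < t then canonB t (run ++ [c]) c cs
    else run :: canonB t [c] c cs

theorem collapse_concat (run : List (List (Int × Int))) (c : List (Int × Int)) :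
    collapse (run ++ [c]) = collapse run ++ c := by
  cases run with
  | nil => simp [collapse]
  | cons b es => simp [collapse, List.foldl_append]

theorem getLastD_append_right {α : Type} (l c : List α) (d : α) (hc : c ≠ []) :
    (l ++ c).getLastD d = c.getLastD d := by
  induction l with
  | nil => rfl
  | cons a l ih =>
    cases l with
    | nil => cases c with
      | nil => exact absurd rfl hc
      | cons x xs => simp [List.getLastD]
    | cons b bs =>
      simpa [List.getLastD] using ih

theorem bridgeA (t : Int) (rest : List (List (Int × Int))) :
    ∀ (front : List (List (Int × Int))) (acc : List (Int × Int)),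
      rest.foldl (mergeAStep t) (front ++ [acc]) = front ++ canonA t acc rest := by
  induction rest with
  | nil => intro front acc; simp [canonA]
  | cons c cs ih =>
    intro front acc
    simp only [List.foldl_cons, canonA, mergeAStep, List.getLastD_concat,
      List.dropLast_concat]
    split_ifs with h
    · simpa using ih front (acc ++ c)
    · simpa [List.append_assoc] using ih (front ++ [acc]) c

theorem bridgeB (t : Int) (rest : List (List (Int × Int))) :
    ∀ (front : List (List (List (Int × Int)))) (run : List (List (Int × Int)))
      (prev : List (Int × Int)),
      ((prev :: rest).zip rest).foldl (bStep t) (front ++ [run]) =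
        front ++ canonB t run prev rest := by
  induction rest with
  | nil => intro front run prev; simp [canonB]
  | cons c cs ih =>
    intro front run prev
    simp only [List.zip_cons_cons, List.foldl_cons, canonB, bStep, List.getLastD_concat,
      List.dropLast_concat]
    split_ifs with h
    · simpa using ih front (run ++ [c]) c
    · simpa [List.append_assoc] using ih (front ++ [run]) [c] c

theorem canon_eq (t : Int) (rest : List (List (Int × Int))) :
    ∀ (run : List (List (Int × Int))) (prev : List (Int × Int)),
      run ≠ [] →
      (collapse run).getLastD (0, 0) = prev.getLastD (0, 0) →
      (∀ c ∈ rest, c ≠ []) →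
      (canonB t run prev rest).map collapse = canonA t (collapse run) rest := by
  induction rest with
  | nil => intro run prev _ _ _; simp [canonA, canonB]
  | cons c cs ih =>
    intro run prev hrun hlink hne
    have hc : c ≠ [] := hne c (by simp)
    have hcs : ∀ x ∈ cs, x ≠ [] := fun x hx => hne x (by simp [hx])
    simp only [canonA, canonB]
    rw [hlink]
    split_ifs with h
    · have ih' := ih (run ++ [c]) c (by simp)
        (by rw [collapse_concat, getLastD_append_right _ _ _ hc]) hcs
      simpa [collapse_concat] using ih'
    · have ih' := ih [c] c (by simp) (by simp [collapse]) hcs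
      simp only [List.map_cons, ih']
      simp [collapse]

-- ===== VERDICT (by name: the statement is the Claim_ definition above) =====
theorem merge_similar_spec : Claim_equal_merge_similar := by
  intro paths t _ hpre
  unfold Spec_merge_similar merge_similar merge_similar_alt
  by_cases hlen : paths.length ≤ 1
  · simp [hlen]
  · simp only [hlen, if_false]
    cases paths with
    | nil => rfl
    | cons p0 rest =>
      have hne : ∀ c ∈ rest, c ≠ [] := by
        rcases hpre with h | h
        · exfalso; apply hlen; exact h
        · intro c hc; exact h c (by simp [hc])
      have hA := bridgeA t rest [] p0
      have hB := bridgeB t rest [] [p0] p0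
      simp only [List.nil_append] at hA hB
      dsimp only
      rw [hA, hB]
      exact (canon_eq t rest [p0] p0 (by simp) (by simp [collapse]) hne).symm
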